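-- pv_equiv track=rewrite | github.com/PrisD/TP-Lexer-Parser | test.py | afd_finsi
-- ===== SOURCE A (Python) =====
-- ESTADO_NO_FINAL = 'ESTADO NO FINAL'
--
-- ESTADO_ACEPTADO = 'ESTADO ACEPTADO'
--
-- ESTADO_TRAMPA = 'ESTADO TRAMPA'
--
-- def afd_finsi (lexema):
--     estado_actual = 'A'
--     estado_final = 'Z'
--     estado_trampa = 'X'
--     for caracter in lexema:
--         if estado_actual == 'A' and caracter == 'f':
--             estado_actual = 'B'
--         elif estado_actual == 'A' and caracter != 'f':
--             estado_actual = 'X'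
--         elif estado_actual == 'B' and caracter == 'i':
--             estado_actual = 'C'
--         elif estado_actual == 'B' and caracter != 'i':
--             estado_actual = 'X'
--         elif estado_actual == 'C' and caracter == 'n':
--             estado_actual = 'D'
--         elif estado_actual == 'C' and caracter != 'n':
--             estado_actual = 'X'
--         elif estado_actual == 'D' and caracter == 's':
--             estado_actual = 'E'
--         elif estado_actual == 'D' and caracter != 's':
--             estado_actual = 'X'
--         elif estado_actual == 'E' and caracter == 'i':
--             estado_actual = 'Z'
--         elif estado_actual == 'E' and caracter != 'i':
--             estado_actual = 'X'
--         elif estado_actual == 'Z' and caracter.isascii():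
--             estado_actual = 'X'
--         elif estado_actual == 'X' and caracter.isascii():
--             estado_actual = 'X'
--     if  estado_actual == estado_final:
--         return ESTADO_ACEPTADO
--     elif estado_actual == estado_trampa:
--         return ESTADO_TRAMPA
--     else:
--         return ESTADO_NO_FINAL
-- ===== SOURCE B (Python) =====
-- ESTADO_NO_FINAL = 'ESTADO NO FINAL'
-- ESTADO_ACEPTADO = 'ESTADO ACEPTADO'
-- ESTADO_TRAMPA = 'ESTADO TRAMPA'
--
-- def afd_finsi(lexema):
--     if lexema == "finsi":
--         return ESTADO_ACEPTADO
--     if "finsi".startswith(lexema):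
--         return ESTADO_NO_FINAL
--     return ESTADO_TRAMPA
-- ===== Notes on version B (the rewrite author's own statement) =====
-- stated objective: simpler
-- what changed: Replaced the hand-written per-character DFA transition chain with a direct string comparison: exact keyword match is accepted, a proper prefix of the keyword is non-final, anything else is trap; equivalence is claimed on the ASCII input domain.
import Mathlib
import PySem

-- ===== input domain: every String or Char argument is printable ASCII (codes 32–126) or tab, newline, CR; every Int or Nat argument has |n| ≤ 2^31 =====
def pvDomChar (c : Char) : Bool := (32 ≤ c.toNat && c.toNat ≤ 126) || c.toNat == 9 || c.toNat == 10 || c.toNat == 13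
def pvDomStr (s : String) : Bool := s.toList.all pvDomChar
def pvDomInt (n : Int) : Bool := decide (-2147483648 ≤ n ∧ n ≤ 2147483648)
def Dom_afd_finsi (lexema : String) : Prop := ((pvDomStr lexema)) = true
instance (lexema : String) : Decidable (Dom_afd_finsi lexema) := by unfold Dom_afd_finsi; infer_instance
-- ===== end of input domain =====

-- B replaces the per-character DFA transition chain by a direct equality/prefix comparison
-- against "finsi" (simpler; equivalence proved on the ASCII input domain Dom_afd_finsi).


-- ===== PORT A =====
-- one transition of the hand-written DFA; caracter.isascii() is ported by hand as
-- 'c.toNat ≤ 127' (exact: isascii() is true iff the code point is below 128)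
def afdStep (st : Char) (c : Char) : Char :=
  if st = 'A' ∧ c = 'f' then 'B'
  else if st = 'A' ∧ c ≠ 'f' then 'X'
  else if st = 'B' ∧ c = 'i' then 'C'
  else if st = 'B' ∧ c ≠ 'i' then 'X'
  else if st = 'C' ∧ c = 'n' then 'D'
  else if st = 'C' ∧ c ≠ 'n' then 'X'
  else if st = 'D' ∧ c = 's' then 'E'
  else if st = 'D' ∧ c ≠ 's' then 'X'
  else if st = 'E' ∧ c = 'i' then 'Z'
  else if st = 'E' ∧ c ≠ 'i' then 'X'
  else if st = 'Z' ∧ c.toNat ≤ 127 then 'X'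
  else if st = 'X' ∧ c.toNat ≤ 127 then 'X'
  else st

def afd_finsi (lexema : String) : String :=
  let estado_actual := lexema.toList.foldl afdStep 'A'
  if estado_actual = 'Z' then "ESTADO ACEPTADO"
  else if estado_actual = 'X' then "ESTADO TRAMPA"
  else "ESTADO NO FINAL"

-- ===== PORT B =====
-- transliteration of Source B: exact match, then prefix test, else trap
def afd_finsi_alt (lexema : String) : String :=
  if lexema = "finsi" then "ESTADO ACEPTADO"
  else if PySem.Chars.startswith "finsi".toList lexema.toList then "ESTADO NO FINAL"
  else "ESTADO TRAMPA"

-- ===== PRECONDITION & SPEC =====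
def Spec_afd_finsi (lexema : String) (out : String) : Prop := out = afd_finsi_alt lexema
instance (lexema : String) (out : String) : Decidable (Spec_afd_finsi lexema out) := by unfold Spec_afd_finsi; infer_instance

-- ===== CLAIM (what is proved, stated in full; the proofs are below) =====
def Claim_equal_afd_finsi : Prop := ∀ (lexema : String), Dom_afd_finsi lexema → Spec_afd_finsi lexema (afd_finsi lexema)

-- ===== LEMMAS AND PROOFS =====

theorem afdStep_X (c : Char) : afdStep 'X' c = 'X' := by
  simp only [afdStep, show ('X':Char) ≠ 'A' from by decide, show ('X':Char) ≠ 'B' from by decide,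
    show ('X':Char) ≠ 'C' from by decide, show ('X':Char) ≠ 'D' from by decide,
    show ('X':Char) ≠ 'E' from by decide, show ('X':Char) ≠ 'Z' from by decide,
    false_and, if_false]
  split <;> rfl

theorem foldl_afdStep_X (cs : List Char) : cs.foldl afdStep 'X' = 'X' := by
  induction cs with
  | nil => rfl
  | cons c cs ih => simpa [afdStep_X] using ih

-- from state Z, over a list of ASCII characters: stay at Z iff the list is empty
theorem foldl_afdStep_Z (cs : List Char) (h : ∀ c ∈ cs, c.toNat ≤ 127) :
    cs.foldl afdStep 'Z' = (if cs = [] then 'Z' else 'X') := by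
  cases cs with
  | nil => rfl
  | cons c cs =>
    have hc : c.toNat ≤ 127 := h c (by simp)
    have hstep : afdStep 'Z' c = 'X' := by
      simp only [afdStep, show ('Z':Char) ≠ 'A' from by decide, show ('Z':Char) ≠ 'B' from by decide,
        show ('Z':Char) ≠ 'C' from by decide, show ('Z':Char) ≠ 'D' from by decide,
        show ('Z':Char) ≠ 'E' from by decide, false_and, if_false]
      simp [hc]
    simp [hstep, foldl_afdStep_X]

-- string equality through toList
theorem str_eq_iff_toList (s t : String) : s = t ↔ s.toList = t.toList :=
  ⟨fun h => by rw [h], fun h => by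
    have h2 := congrArg String.ofList h
    simpa using h2⟩

theorem finsi_toList : "finsi".toList = ['f', 'i', 'n', 's', 'i'] := by decide

-- ===== VERDICT (by name: the statement is the Claim_ definition above) =====
theorem afd_finsi_spec : Claim_equal_afd_finsi := by
  intro lexema hdom
  unfold Spec_afd_finsi afd_finsi afd_finsi_alt
  have hd : ∀ c ∈ lexema.toList, c.toNat ≤ 127 := by
    intro c hc
    have := List.all_eq_true.mp hdom c hc
    simp [pvDomChar] at this
    omega
  simp only [str_eq_iff_toList lexema "finsi", finsi_toList]
  generalize hcs : lexema.toList = cs at hd ⊢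
  match cs with
  | [] => decide
  | [a] =>
    by_cases ha : a = 'f' <;>
      simp [ha, afdStep, PySem.Chars.startswith, List.isPrefixOf]
  | [a, b] =>
    by_cases ha : a = 'f' <;> by_cases hb : b = 'i' <;>
      simp [ha, hb, afdStep, PySem.Chars.startswith, List.isPrefixOf]
  | [a, b, c] =>
    by_cases ha : a = 'f' <;> by_cases hb : b = 'i' <;> by_cases hc : c = 'n' <;>
      simp [ha, hb, hc, afdStep, PySem.Chars.startswith, List.isPrefixOf]
  | [a, b, c, d] =>
    by_cases ha : a = 'f' <;> by_cases hb : b = 'i' <;> by_cases hc : c = 'n' <;>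
        by_cases hdd : d = 's' <;>
      simp [ha, hb, hc, hdd, afdStep, PySem.Chars.startswith, List.isPrefixOf]
  | a :: b :: c :: d :: e :: rest =>
    have hrest : ∀ x ∈ rest, x.toNat ≤ 127 := by
      intro x hx; exact hd x (by simp [hx])
    by_cases h5 : a = 'f' ∧ b = 'i' ∧ c = 'n' ∧ d = 's' ∧ e = 'i'
    · obtain ⟨ha, hb, hc, hdd, he⟩ := h5; subst ha hb hc hdd he
      cases rest with
      | nil => simp [afdStep]
      | cons r rs =>
        simp [afdStep, foldl_afdStep_Z _ hrest, PySem.Chars.startswith, List.isPrefixOf]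
    · by_cases ha : a = 'f' <;> by_cases hb : b = 'i' <;> by_cases hc : c = 'n' <;>
          by_cases hdd : d = 's' <;> by_cases he : e = 'i' <;>
        simp [ha, hb, hc, hdd, he, afdStep, foldl_afdStep_X, PySem.Chars.startswith,
          List.isPrefixOf] <;>
        exact absurd ⟨ha, hb, hc, hdd, he⟩ h5
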